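-- pv_equiv track=rewrite | github.com/zhwangs/public-archive-Nonequilibrium-origin-of-native-ring-anisotropy-in-amorphous-systems | NRS_ISF_MC_sampling/gen_second_max_random_structures_step1.py | alternate_repeat
-- ===== SOURCE A (Python) =====
-- def alternate_repeat(string1, string2, times):
--     result = []
--     for i in range(times):
--         if i % 2 == 0:
--             result.append(string1)
--         else:
--             result.append(string2)
--     return result
-- ===== SOURCE B (Python) =====
-- def alternate_repeat(string1, string2, times):
--     n = max(times, 0)
--     return ([string1, string2] * ((n + 1) // 2))[:n]
-- ===== Notes on version B (the rewrite author's own statement) =====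
-- stated objective: simpler
-- what changed: Replaces the per-index i % 2 branch loop with block replication: repeat the two-element block ceil(n/2) times and truncate to n.
import Mathlib
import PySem

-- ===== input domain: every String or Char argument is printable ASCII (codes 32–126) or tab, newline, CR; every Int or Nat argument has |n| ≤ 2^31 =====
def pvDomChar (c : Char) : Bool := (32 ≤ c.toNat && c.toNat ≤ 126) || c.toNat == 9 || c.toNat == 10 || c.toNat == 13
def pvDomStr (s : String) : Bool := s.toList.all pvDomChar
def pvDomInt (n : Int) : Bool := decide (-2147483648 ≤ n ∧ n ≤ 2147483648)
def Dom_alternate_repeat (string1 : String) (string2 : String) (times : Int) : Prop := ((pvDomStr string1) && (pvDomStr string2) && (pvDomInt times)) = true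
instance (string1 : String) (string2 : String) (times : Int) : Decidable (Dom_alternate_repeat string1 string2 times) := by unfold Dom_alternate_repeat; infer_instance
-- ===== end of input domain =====

-- B replaces A's per-index i % 2 branch loop by replicating the two-element block and truncating; objective: simpler.

-- ===== PORT A =====
def alternate_repeat (string1 : String) (string2 : String) (times : Int) : List String :=
  (PySem.List.pyRange 0 times 1).foldl
    (fun result i => if i % 2 == 0 then result ++ [string1] else result ++ [string2]) []

-- ===== PORT B =====
-- [:n] with n ≥ 0 is List.take n; [string1, string2] * k is flatten of k replicas.
def alternate_repeat_alt (string1 : String) (string2 : String) (times : Int) : List String :=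
  let n : Int := max times 0
  (List.flatten (List.replicate ((n + 1) / 2).toNat [string1, string2])).take n.toNat

-- ===== PRECONDITION & SPEC =====
def Spec_alternate_repeat (string1 : String) (string2 : String) (times : Int) (out : List String) : Prop := out = alternate_repeat_alt string1 string2 times
instance (string1 : String) (string2 : String) (times : Int) (out : List String) : Decidable (Spec_alternate_repeat string1 string2 times out) := by unfold Spec_alternate_repeat; infer_instance

-- ===== CLAIM (what is proved, stated in full; the proofs are below) =====
def Claim_equal_alternate_repeat : Prop := ∀ (string1 : String) (string2 : String) (times : Int), Dom_alternate_repeat string1 string2 times → Spec_alternate_repeat string1 string2 times (alternate_repeat string1 string2 times)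

-- ===== LEMMAS AND PROOFS =====

-- element i of the flattened replicas of the two-element block
lemma flatten_replicate_pair_getElem {α : Type} (a b : α) :
    ∀ (k i : Nat) (h : i < (List.flatten (List.replicate k [a, b])).length),
      (List.flatten (List.replicate k [a, b]))[i] = if i % 2 = 0 then a else b := by
  intro k
  induction k with
  | zero => intro i h; simp at h
  | succ k ih =>
    intro i h
    match i with
    | 0 => simp [List.replicate_succ]
    | 1 => simp [List.replicate_succ]
    | (j + 2) =>
      have h' : j < (List.flatten (List.replicate k [a, b])).length := by
        simp [List.length_flatten] at h ⊢
        omega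
      have : (List.flatten (List.replicate (k + 1) [a, b]))[j + 2] =
          (List.flatten (List.replicate k [a, b]))[j] := by
        simp [List.replicate_succ]
      rw [this, ih j h']
      have : (j + 2) % 2 = j % 2 := by omega
      rw [this]

lemma alternate_repeat_eq (string1 string2 : String) (times : Int) :
    alternate_repeat string1 string2 times = alternate_repeat_alt string1 string2 times := by
  unfold alternate_repeat alternate_repeat_alt
  rw [PySem.List.pyRange_one]
  rw [show ((times : Int) - 0).toNat = times.toNat by omega]
  have hfold : ∀ (l : List Int) (acc : List String),
      l.foldl (fun result i => if i % 2 == 0 then result ++ [string1] else result ++ [string2]) acc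
        = acc ++ l.map (fun i => if i % 2 = 0 then string1 else string2) := by
    intro l
    induction l with
    | nil => intro acc; simp
    | cons x xs ih =>
      intro acc
      simp only [List.foldl_cons, List.map_cons]
      by_cases hx : x % 2 = 0
      · have hb : (x % 2 == 0) = true := by simpa using hx
        rw [hb, if_pos rfl, if_pos hx, ih]
        simp
      · have hb : (x % 2 == 0) = false := by simpa using hx
        rw [hb, if_neg (by simp), if_neg hx, ih]
        simp
  rw [hfold]
  simp only [List.nil_append, List.map_map]
  set n := times.toNat with hn
  have hmax : (max times 0).toNat = n := by omega
  have hhalf : ((max times 0 + 1) / 2).toNat = (n + 1) / 2 := by omega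
  rw [hmax, hhalf]
  apply List.ext_getElem
  · simp [List.length_flatten]
    omega
  · intro i h1 h2
    simp only [List.getElem_map, List.getElem_range, Function.comp]
    rw [List.getElem_take, flatten_replicate_pair_getElem]
    by_cases hi : i % 2 = 0
    · rw [if_pos hi, if_pos (show ((0 : Int) + (i : Nat)) % 2 = 0 by omega)]
    · rw [if_neg hi, if_neg (show ¬ ((0 : Int) + (i : Nat)) % 2 = 0 by omega)]

-- ===== VERDICT (by name: the statement is the Claim_ definition above) =====
theorem alternate_repeat_spec : Claim_equal_alternate_repeat := by
  intro s1 s2 t _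
  exact alternate_repeat_eq s1 s2 t
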